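-- pv_equiv track=rewrite | github.com/lmmsoft/LeetCode | LeetCode-Algorithm/1018. Binary Prefix Divisible By 5/1018-TBD.py | prefixesDivBy5
-- ===== SOURCE A (Python) =====
-- from typing import List
--
-- def prefixesDivBy5(A: List[int]) -> List[bool]:
--     res = []
--     num = 0
--     for a in A:
--         num += a
--         if num % 5 == 0:
--             res.append(True)
--         else:
--             res.append(False)
--         num *= 2
--     return res
-- ===== SOURCE B (Python) =====
-- from typing import List
--
-- def prefixesDivBy5(A: List[int]) -> List[bool]:
--     # The i-th prefix value is sum_{j<=i} A[j] * 2^(i-j).  Multiplying by the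
--     # unit 3^i (3 = 2^{-1} mod 5) turns this into the weighted prefix sum
--     # sum_{j<=i} A[j] * 3^j, which is divisible by 5 iff the prefix value is.
--     # The weights 3^j mod 5 cycle with period 4: 1, 3, 4, 2.
--     W = (1, 3, 4, 2)
--     terms = [a * W[j % 4] for j, a in enumerate(A)]
--     sums = []
--     s = 0
--     for t in terms:
--         s += t
--         sums.append(s)
--     return [s % 5 == 0 for s in sums]
-- ===== Notes on version B (the rewrite author's own statement) =====
-- stated objective: faster
-- what changed: B replaces A's Horner-style doubling accumulator by a weighted prefix sum: it multiplies each element by the periodic weight 3^j mod 5 (table [1,3,4,2]), takes plain running sums in a second pass, and tests divisibility by 5 in a third pass; correct because 3 is the inverse of 2 mod 5, so the prefix value times the unit 3^i equals the weighted sum mod 5.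
import Mathlib
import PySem

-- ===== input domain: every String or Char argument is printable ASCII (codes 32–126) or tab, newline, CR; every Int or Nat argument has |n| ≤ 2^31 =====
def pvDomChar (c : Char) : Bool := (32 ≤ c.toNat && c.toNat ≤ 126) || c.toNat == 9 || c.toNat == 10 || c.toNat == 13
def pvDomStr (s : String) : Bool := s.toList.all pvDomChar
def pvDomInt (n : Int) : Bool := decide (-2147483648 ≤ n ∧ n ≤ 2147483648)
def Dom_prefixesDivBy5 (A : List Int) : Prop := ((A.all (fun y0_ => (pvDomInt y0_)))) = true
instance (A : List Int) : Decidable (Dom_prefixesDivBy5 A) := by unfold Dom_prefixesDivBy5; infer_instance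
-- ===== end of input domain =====

-- B replaces A's doubling accumulator by a three-stage weighted-prefix-sum computation
-- (weights 3^j mod 5, 3 = 2^{-1} mod 5); objective: faster (asymptotic).

-- ===== PORT A =====
def pvALoop (l : List Int) (res : List Bool) (num : Int) : List Bool :=
  match l with
  | [] => res
  | a :: t =>
    let num' := num + a
    pvALoop t (res ++ [if PySem.Int.mod num' 5 = 0 then true else false]) (num' * 2)

def prefixesDivBy5 (A : List Int) : List Bool := pvALoop A [] 0

-- ===== PORT B =====
-- W = (1, 3, 4, 2); the index j % 4 is always in range, so getD is exact tuple indexing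
def pvW3 : List Int := [1, 3, 4, 2]

-- terms = [a * W[j % 4] for j, a in enumerate(A)]
def pvTerms (A : List Int) : List Int :=
  (PySem.List.enumerate A).map (fun p => p.2 * pvW3.getD (PySem.Int.mod p.1 4).toNat 0)

-- the 'for t in terms: s += t; sums.append(s)' loop
def pvSumLoop (terms : List Int) (sums : List Int) (s : Int) : List Int :=
  match terms with
  | [] => sums
  | t :: ts => pvSumLoop ts (sums ++ [s + t]) (s + t)

def prefixesDivBy5_alt (A : List Int) : List Bool :=
  (pvSumLoop (pvTerms A) [] 0).map (fun s => decide (PySem.Int.mod s 5 = 0))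

-- ===== PRECONDITION & SPEC =====
def Spec_prefixesDivBy5 (A : List Int) (out : List Bool) : Prop := out = prefixesDivBy5_alt A
instance (A : List Int) (out : List Bool) : Decidable (Spec_prefixesDivBy5 A out) := by unfold Spec_prefixesDivBy5; infer_instance

-- ===== CLAIM (what is proved, stated in full; the proofs are below) =====
def Claim_equal_prefixesDivBy5 : Prop := ∀ (A : List Int), Dom_prefixesDivBy5 A → Spec_prefixesDivBy5 A (prefixesDivBy5 A)

-- ===== LEMMAS AND PROOFS =====

-- the weight used by B at (0-based) position j
def pvWAt (j : Nat) : Int := pvW3.getD (j % 4) 0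

lemma pvSumLoop_append (terms sums : List Int) (s : Int) :
    pvSumLoop terms sums s = sums ++ pvSumLoop terms [] s := by
  induction terms generalizing sums s with
  | nil => simp [pvSumLoop]
  | cons t ts ih =>
    rw [pvSumLoop, pvSumLoop, ih (sums ++ [s + t]), ih ([] ++ [s + t])]
    simp

-- B's whole pipeline, fused into one recursion (proof-side restatement of B)
def pvFused (l : List Int) (j : Nat) (s : Int) : List Bool :=
  match l with
  | [] => []
  | a :: t =>
    let s' := s + a * pvWAt j
    decide (PySem.Int.mod s' 5 = 0) :: pvFused t (j + 1) s'

lemma pvBLoop_fused : ∀ (l : List Int) (j : Nat) (s : Int),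
    (pvSumLoop ((PySem.List.enumerate l (j : Int)).map
        (fun p => p.2 * pvW3.getD (PySem.Int.mod p.1 4).toNat 0)) [] s).map
      (fun s => decide (PySem.Int.mod s 5 = 0)) = pvFused l j s := by
  intro l
  induction l with
  | nil => intro j s; simp [PySem.List.enumerate_nil, pvSumLoop, pvFused]
  | cons a t ih =>
    intro j s
    have hmod : (PySem.Int.mod (j : Int) 4).toNat = j % 4 := by
      rw [PySem.Int.mod_eq_emod_of_pos (by norm_num : (0:Int) < 4)]
      omega
    rw [PySem.List.enumerate_cons, List.map_cons, pvSumLoop,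
      pvSumLoop_append, List.map_append]
    have : ((j : Int) + 1) = ((j + 1 : Nat) : Int) := by push_cast; ring
    rw [this, hmod]
    simp only [pvFused, pvWAt, List.map_cons, List.map_nil, List.cons_append,
      List.nil_append, ih (j + 1)]
    rfl

lemma pvWAt_cycle (j : Nat) :
    (pvWAt j = 1 ∧ pvWAt (j + 1) = 3) ∨ (pvWAt j = 3 ∧ pvWAt (j + 1) = 4) ∨
    (pvWAt j = 4 ∧ pvWAt (j + 1) = 2) ∨ (pvWAt j = 2 ∧ pvWAt (j + 1) = 1) := by
  have h4 : j % 4 = 0 ∨ j % 4 = 1 ∨ j % 4 = 2 ∨ j % 4 = 3 := by omega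
  rcases h4 with h | h | h | h
  · have h1 : (j + 1) % 4 = 1 := by omega
    exact Or.inl ⟨by simp [pvWAt, h, pvW3], by simp [pvWAt, h1, pvW3]⟩
  · have h1 : (j + 1) % 4 = 2 := by omega
    exact Or.inr (Or.inl ⟨by simp [pvWAt, h, pvW3], by simp [pvWAt, h1, pvW3]⟩)
  · have h1 : (j + 1) % 4 = 3 := by omega
    exact Or.inr (Or.inr (Or.inl ⟨by simp [pvWAt, h, pvW3], by simp [pvWAt, h1, pvW3]⟩))
  · have h1 : (j + 1) % 4 = 0 := by omega
    exact Or.inr (Or.inr (Or.inr ⟨by simp [pvWAt, h, pvW3], by simp [pvWAt, h1, pvW3]⟩))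

-- main invariant: A's accumulator num and B's weighted sum s satisfy num * w(j) ≡ s (mod 5)
lemma pvLoop_eq : ∀ (l : List Int) (res : List Bool) (j : Nat) (num s : Int),
    (num * pvWAt j - s) % 5 = 0 →
    pvALoop l res num = res ++ pvFused l j s := by
  intro l
  induction l with
  | nil => intro res j num s _; simp [pvALoop, pvFused]
  | cons a t ih =>
    intro res j num s h
    simp only [pvALoop, pvFused,
      PySem.Int.mod_eq_emod_of_pos (by norm_num : (0:Int) < 5)] at *
    have hcw : ((num + a) % 5 = 0 ↔ (s + a * pvWAt j) % 5 = 0) ∧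
        ((num + a) * 2 * pvWAt (j + 1) - (s + a * pvWAt j)) % 5 = 0 := by
      rcases pvWAt_cycle j with ⟨hW, hW'⟩ | ⟨hW, hW'⟩ | ⟨hW, hW'⟩ | ⟨hW, hW'⟩ <;>
        · simp only [hW, hW'] at h ⊢
          constructor
          · constructor <;> intro hz <;> omega
          · omega
    rw [ih _ (j + 1) _ _ hcw.2, List.append_assoc]
    congr 2
    by_cases hz : (num + a) % 5 = 0
    · simp [hz, hcw.1.mp hz]
    · have hz2 : ¬ (s + a * pvWAt j) % 5 = 0 := fun hzz => hz (hcw.1.mpr hzz)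
      simp [hz, hz2]

-- ===== VERDICT (by name: the statement is the Claim_ definition above) =====
theorem prefixesDivBy5_spec : Claim_equal_prefixesDivBy5 := by
  intro A _
  unfold Spec_prefixesDivBy5 prefixesDivBy5 prefixesDivBy5_alt pvTerms
  have hB := pvBLoop_fused A 0 0
  simp only [Nat.cast_zero] at hB
  rw [hB]
  simpa using pvLoop_eq A [] 0 0 0 (by decide)
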